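-- pv_equiv track=rewrite | github.com/HasanZia2/Number-Theory-Program | ContinuedFractionCalculator.py | pAlgorithm
-- ===== SOURCE A (Python) =====
-- def pAlgorithm(continued_fraction, index):
--     # This function performs the p calculation for the (p, q)-algorithm.
--
--     if index == 0:
--         p = continued_fraction[0]
--     elif index == 1:
--         p = continued_fraction[0]*continued_fraction[1] + 1
--     else:
--         return continued_fraction[index]*pAlgorithm(continued_fraction, index - 1) + pAlgorithm(continued_fraction, index - 2)
--     return p
-- ===== SOURCE B (Python) =====
-- def pAlgorithm(continued_fraction, index):
--     # Bottom-up linear DP over the recurrence p_k = a_k*p_{k-1} + p_{k-2}.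
--     if index == 0:
--         return continued_fraction[0]
--     p_prev = continued_fraction[0]
--     p = continued_fraction[0] * continued_fraction[1] + 1
--     for i in range(2, index + 1):
--         p_prev, p = p, continued_fraction[i] * p + p_prev
--     return p
-- ===== Notes on version B (the rewrite author's own statement) =====
-- stated objective: faster
-- what changed: Replaced the naive binary recursion over the recurrence p_k = a_k*p_{k-1} + p_{k-2} with a bottom-up linear loop carrying the last two values; intended as faster (exponential vs linear): A timed out at moderate indices where B returned, and B measured 5.59x at the largest size both finished.
import Mathlib
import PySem

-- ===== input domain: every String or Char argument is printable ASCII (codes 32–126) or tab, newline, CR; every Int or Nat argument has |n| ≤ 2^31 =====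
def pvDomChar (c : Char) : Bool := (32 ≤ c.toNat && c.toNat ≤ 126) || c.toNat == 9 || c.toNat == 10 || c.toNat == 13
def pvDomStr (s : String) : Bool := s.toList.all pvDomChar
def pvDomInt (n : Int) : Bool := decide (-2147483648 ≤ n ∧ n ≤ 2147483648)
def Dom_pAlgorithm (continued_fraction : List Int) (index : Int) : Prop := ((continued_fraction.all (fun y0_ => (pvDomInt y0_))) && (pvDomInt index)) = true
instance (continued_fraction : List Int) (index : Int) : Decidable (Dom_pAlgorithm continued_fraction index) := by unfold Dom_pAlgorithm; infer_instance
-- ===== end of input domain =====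

-- B replaces A's naive binary recursion with a bottom-up linear loop over the recurrence (intended as faster; a timing run saw A time out where B returned).

-- ===== PORT A =====
-- A recurses on the Int index; under Pre_ the index is ≥ 0, so the recursion is
-- transcribed on the Nat measure index.toNat (negative indices, on which the
-- Python diverges, are outside Pre_ and return 0 here).
def pAlgorithmNat (continued_fraction : List Int) : Nat → Int
  | 0 => (PySem.List.pyGet? continued_fraction 0).getD 0
  | 1 => (PySem.List.pyGet? continued_fraction 0).getD 0 *
         (PySem.List.pyGet? continued_fraction 1).getD 0 + 1
  | (n+2) => (PySem.List.pyGet? continued_fraction ((n : Int) + 2)).getD 0 *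
               pAlgorithmNat continued_fraction (n+1) +
             pAlgorithmNat continued_fraction n

def pAlgorithm (continued_fraction : List Int) (index : Int) : Int :=
  if index < 0 then 0 else pAlgorithmNat continued_fraction index.toNat

-- ===== PORT B =====
def pAlgorithm_alt (continued_fraction : List Int) (index : Int) : Int :=
  if index == 0 then (PySem.List.pyGet? continued_fraction 0).getD 0
  else
    let init : Int × Int :=
      ((PySem.List.pyGet? continued_fraction 0).getD 0,
       (PySem.List.pyGet? continued_fraction 0).getD 0 *
         (PySem.List.pyGet? continued_fraction 1).getD 0 + 1)
    let r := (PySem.List.pyRange 2 (index + 1) 1).foldl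
      (fun (s : Int × Int) i =>
        (s.2, (PySem.List.pyGet? continued_fraction i).getD 0 * s.2 + s.1)) init
    r.2

-- ===== PRECONDITION & SPEC =====
-- Pre_ excludes negative indices (A recurses forever: RecursionError) and
-- indices ≥ length (A raises IndexError).
def Pre_pAlgorithm (continued_fraction : List Int) (index : Int) : Prop :=
  0 ≤ index ∧ index < continued_fraction.length
instance (continued_fraction : List Int) (index : Int) : Decidable (Pre_pAlgorithm continued_fraction index) := by unfold Pre_pAlgorithm; infer_instance

def pvWitness_pAlgorithm : List Int × Int := ([2, 3, 4], 2)

def Spec_pAlgorithm (continued_fraction : List Int) (index : Int) (out : Int) : Prop := out = pAlgorithm_alt continued_fraction index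
instance (continued_fraction : List Int) (index : Int) (out : Int) : Decidable (Spec_pAlgorithm continued_fraction index out) := by unfold Spec_pAlgorithm; infer_instance

-- ===== CLAIM (what is proved, stated in full; the proofs are below) =====
def Claim_equal_pAlgorithm : Prop := ∀ (continued_fraction : List Int) (index : Int), Dom_pAlgorithm continued_fraction index → Pre_pAlgorithm continued_fraction index → Spec_pAlgorithm continued_fraction index (pAlgorithm continued_fraction index)

-- ===== LEMMAS AND PROOFS =====

-- The loop invariant: after consuming range(2, n+2) the pair holds the last two
-- p-values of the recurrence.
theorem foldl_pair_eq (cf : List Int) (n : Nat) :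
    (PySem.List.pyRange 2 ((n : Int) + 2) 1).foldl
      (fun (s : Int × Int) i =>
        (s.2, (PySem.List.pyGet? cf i).getD 0 * s.2 + s.1))
      ((PySem.List.pyGet? cf 0).getD 0,
       (PySem.List.pyGet? cf 0).getD 0 * (PySem.List.pyGet? cf 1).getD 0 + 1)
    = (pAlgorithmNat cf n, pAlgorithmNat cf (n+1)) := by
  induction n with
  | zero => simp [PySem.List.pyRange, pAlgorithmNat]
  | succ m ih =>
    have h : ((m : Int) + 1) + 2 = (m : Int) + 2 + 1 := by ring
    have hstep := PySem.List.pyRange_one_succ_right (a := 2) (b := (m : Int) + 2)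
      (by omega)
    rw [show ((m + 1 : Nat) : Int) = (m : Int) + 1 by push_cast; ring, h, hstep,
      List.foldl_append, ih]
    simp [pAlgorithmNat]

theorem pAlgorithm_spec : Claim_equal_pAlgorithm := by
  intro cf index _ hpre
  obtain ⟨h0, _⟩ := hpre
  unfold Spec_pAlgorithm pAlgorithm pAlgorithm_alt
  rw [if_neg (by omega)]
  by_cases hz : index = 0
  · subst hz; simp [pAlgorithmNat]
  · rw [if_neg (by simpa using hz)]
    obtain ⟨n, rfl⟩ : ∃ n : Nat, index = (n : Int) + 1 := by
      refine ⟨(index - 1).toNat, by omega⟩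
    have : ((n : Int) + 1).toNat = n + 1 := by omega
    rw [this]
    have := foldl_pair_eq cf n
    simp only [show (n : Int) + 1 + 1 = (n : Int) + 2 by ring]
    rw [this]
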